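-- pv_equiv track=rewrite | github.com/codyrgraphic/kataru | test_microphones.py | score_microphones
-- ===== SOURCE A (Python) =====
-- def score_microphones(microphones, preferences):
--     """Score microphones based on preferences."""
--     scored_mics = []
--
--     for idx, name in microphones:
--         score = 0
--         name_lower = name.lower()
--         for pattern, priority in preferences.items():
--             if pattern in name_lower:
--                 score = max(score, priority)
--         scored_mics.append((idx, name, score))
--
--     scored_mics.sort(key=lambda x: x[2], reverse=True)
--     return scored_mics
-- ===== SOURCE B (Python) =====
-- def score_microphones(microphones, preferences):
--     """Score microphones based on preferences."""
--     prefs_desc = sorted(preferences.items(), key=lambda kv: kv[1], reverse=True)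
--
--     def score(name):
--         low = name.lower()
--         return next((max(0, pr) for pat, pr in prefs_desc if pat in low), 0)
--
--     scored_mics = [(idx, name, score(name)) for idx, name in microphones]
--     scored_mics.sort(key=lambda x: x[2], reverse=True)
--     return scored_mics
-- ===== Notes on version B (the rewrite author's own statement) =====
-- stated objective: faster
-- what changed: B sorts the preference items by priority descending once up front, then builds the scored list by a comprehension that stops at the FIRST matching pattern (score = max(0, its priority)) instead of A's running-max scan over every preference item for every microphone; the final stable score sort is unchanged.
import Mathlib
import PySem

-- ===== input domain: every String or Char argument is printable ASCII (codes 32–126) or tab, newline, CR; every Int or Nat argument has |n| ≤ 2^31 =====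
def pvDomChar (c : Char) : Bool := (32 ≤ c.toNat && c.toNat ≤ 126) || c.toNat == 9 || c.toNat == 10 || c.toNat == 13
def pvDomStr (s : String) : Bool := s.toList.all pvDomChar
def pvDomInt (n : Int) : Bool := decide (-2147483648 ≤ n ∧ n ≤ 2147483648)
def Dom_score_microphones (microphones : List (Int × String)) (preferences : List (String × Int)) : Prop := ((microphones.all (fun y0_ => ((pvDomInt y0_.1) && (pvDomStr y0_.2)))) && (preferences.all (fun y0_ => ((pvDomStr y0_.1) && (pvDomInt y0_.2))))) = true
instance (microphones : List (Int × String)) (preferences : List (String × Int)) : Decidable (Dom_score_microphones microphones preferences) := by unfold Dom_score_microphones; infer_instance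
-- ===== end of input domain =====

-- B pre-sorts the preferences by priority descending once, then early-exits each mic's scan at
-- the first matching pattern (score = max(0, its priority)); the final stable sort is unchanged.

-- ===== PORT A =====
-- running-max scan over ALL preference items for each microphone
def score_microphones (microphones : List (Int × String)) (preferences : List (String × Int)) : List (Int × String × Int) :=
  let scored_mics := microphones.foldl (fun acc p =>
    let name_lower := PySem.Str.lower p.2
    let score := preferences.foldl (fun s q =>
      if PySem.Str.isIn q.1 name_lower then max s q.2 else s) 0
    acc ++ [(p.1, p.2, score)]) []
  PySem.List.sorted scored_mics (fun x => x.2.2) true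

-- ===== PORT B =====
-- first matching pattern in the descending-priority list (0 if none), floored at 0
def pvFirstScore (name_lower : String) : List (String × Int) → Int
  | [] => 0
  | q :: t => if PySem.Str.isIn q.1 name_lower then max 0 q.2 else pvFirstScore name_lower t

def score_microphones_alt (microphones : List (Int × String)) (preferences : List (String × Int)) : List (Int × String × Int) :=
  let prefs_desc := PySem.List.sorted preferences (fun kv => kv.2) true
  let scored_mics := microphones.map (fun p => (p.1, p.2, pvFirstScore (PySem.Str.lower p.2) prefs_desc))
  PySem.List.sorted scored_mics (fun x => x.2.2) true

-- ===== PRECONDITION & SPEC =====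
def Spec_score_microphones (microphones : List (Int × String)) (preferences : List (String × Int)) (out : List (Int × String × Int)) : Prop := out = score_microphones_alt microphones preferences
instance (microphones : List (Int × String)) (preferences : List (String × Int)) (out : List (Int × String × Int)) : Decidable (Spec_score_microphones microphones preferences out) := by unfold Spec_score_microphones; infer_instance

-- ===== CLAIM (what is proved, stated in full; the proofs are below) =====
def Claim_equal_score_microphones : Prop := ∀ (microphones : List (Int × String)) (preferences : List (String × Int)), Dom_score_microphones microphones preferences → Spec_score_microphones microphones preferences (score_microphones microphones preferences)

-- ===== LEMMAS AND PROOFS =====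

-- the running-max step of A's inner loop
def pvStep (nl : String) (s : Int) (q : String × Int) : Int :=
  if PySem.Str.isIn q.1 nl then max s q.2 else s

theorem pvStep_rcomm (nl : String) (a : Int) (x y : String × Int) :
    pvStep nl (pvStep nl a x) y = pvStep nl (pvStep nl a y) x := by
  simp only [pvStep]; split_ifs <;> simp [max_left_comm, max_comm]

-- once the accumulator dominates every remaining priority, the fold is constant
theorem pvFoldl_const (nl : String) (a : Int) (t : List (String × Int))
    (h : ∀ x ∈ t, x.2 ≤ a) : t.foldl (pvStep nl) a = a := by
  induction t with
  | nil => rfl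
  | cons x t ih =>
    have hx := h x (by simp)
    simp only [List.foldl_cons, pvStep]
    split_ifs with hm
    · rw [max_eq_left hx]; exact ih (fun y hy => h y (by simp [hy]))
    · exact ih (fun y hy => h y (by simp [hy]))

-- on a priority-descending list, A's running max equals B's first-match score
theorem pvFoldl_sorted_eq (nl : String) (l : List (String × Int))
    (h : l.Pairwise (fun a b => b.2 ≤ a.2)) :
    l.foldl (pvStep nl) 0 = pvFirstScore nl l := by
  induction l with
  | nil => rfl
  | cons q t ih =>
    rw [List.pairwise_cons] at h
    simp only [List.foldl_cons, pvFirstScore, pvStep]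
    split_ifs with hm
    · rw [max_comm]
      exact pvFoldl_const nl _ t (fun x hx => le_trans (h.1 x hx) (le_max_left _ _))
    · exact ih h.2

-- A's inner fold over preferences equals B's scan of the pre-sorted list
theorem pvScore_eq (nl : String) (preferences : List (String × Int)) :
    preferences.foldl (pvStep nl) 0
      = pvFirstScore nl (PySem.List.sorted preferences (fun kv => kv.2) true) := by
  haveI : RightCommutative (pvStep nl) := ⟨fun a x y => pvStep_rcomm nl a x y⟩
  rw [← pvFoldl_sorted_eq nl _ (PySem.List.sorted_pairwise_rev preferences (fun kv => kv.2))]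
  exact List.Perm.foldl_eq (PySem.List.sorted_perm preferences (fun kv => kv.2) true).symm 0

-- the two scored lists (before the final sort) are equal
theorem pvScored_eq (microphones : List (Int × String)) (preferences : List (String × Int)) :
    microphones.foldl (fun acc p =>
      acc ++ [(p.1, p.2, preferences.foldl (fun s q =>
        if PySem.Str.isIn q.1 (PySem.Str.lower p.2) then max s q.2 else s) 0)]) []
    = microphones.map (fun p => (p.1, p.2, pvFirstScore (PySem.Str.lower p.2)
          (PySem.List.sorted preferences (fun kv => kv.2) true))) := by
  rw [PySem.List.foldl_append_singleton_eq_map, List.nil_append]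
  exact (List.map_congr_left (fun p _ =>
    congrArg (fun s => (p.1, p.2, s)) (pvScore_eq (PySem.Str.lower p.2) preferences)))

-- ===== VERDICT (by name: the statement is the Claim_ definition above) =====
theorem score_microphones_spec : Claim_equal_score_microphones := by
  intro microphones preferences _
  exact congrArg (fun l => PySem.List.sorted l (fun x : Int × String × Int => x.2.2) true)
    (pvScored_eq microphones preferences)
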